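-- pv_equiv track=rewrite | github.com/luornor/spotter_ai_challenge | backend/core/trip/services.py | build_logs
-- ===== SOURCE A (Python) =====
-- from typing import Dict, Any, List, Tuple
--
-- MAX_DRIVE_HOURS_PER_DAY = 11
--
-- def build_logs(total_minutes: int) -> List[List[Dict[str, Any]]]:
--     logs: List[List[Dict[str, Any]]] = []
--     left = total_minutes
--     while left > 0:
--         drive_today = min(MAX_DRIVE_HOURS_PER_DAY * 60, left)
--         end_h, end_m = divmod(8 * 60 + drive_today, 60)
--         day = [
--             {"status": "on_duty", "start": "07:00", "end": "08:00"},
--             {"status": "driving", "start": "08:00", "end": f"{end_h:02d}:{end_m:02d}"},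
--         ]
--         if drive_today < left:
--             day.append({"status": "off_duty", "start": f"{end_h:02d}:{end_m:02d}", "end": "24:00"})
--         logs.append(day)
--         left -= drive_today
--     return logs
-- ===== SOURCE B (Python) =====
-- def build_logs(total_minutes):
--     # closed form: all full days are the identical 11h block ending 19:00;
--     # only the last (partial-or-full) day needs its end time computed
--     if total_minutes <= 0:
--         return []
--     full_days, rem = divmod(total_minutes, 660)
--     if rem == 0:
--         full_days -= 1
--         rem = 660
--     h, m = divmod(480 + rem, 60)
--     full_day = lambda: [
--         {"status": "on_duty", "start": "07:00", "end": "08:00"},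
--         {"status": "driving", "start": "08:00", "end": "19:00"},
--         {"status": "off_duty", "start": "19:00", "end": "24:00"},
--     ]
--     last_day = [
--         {"status": "on_duty", "start": "07:00", "end": "08:00"},
--         {"status": "driving", "start": "08:00", "end": f"{h:02d}:{m:02d}"},
--     ]
--     return [full_day() for _ in range(full_days)] + [last_day]
-- ===== Notes on version B (the rewrite author's own statement) =====
-- stated objective: alternative
-- what changed: Replaces A's subtract-until-zero loop that recomputes each day's end time with a closed form: one divmod gives the count of identical literal full days (always ending 19:00), replicated, plus a single computed last day
import Mathlib
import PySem

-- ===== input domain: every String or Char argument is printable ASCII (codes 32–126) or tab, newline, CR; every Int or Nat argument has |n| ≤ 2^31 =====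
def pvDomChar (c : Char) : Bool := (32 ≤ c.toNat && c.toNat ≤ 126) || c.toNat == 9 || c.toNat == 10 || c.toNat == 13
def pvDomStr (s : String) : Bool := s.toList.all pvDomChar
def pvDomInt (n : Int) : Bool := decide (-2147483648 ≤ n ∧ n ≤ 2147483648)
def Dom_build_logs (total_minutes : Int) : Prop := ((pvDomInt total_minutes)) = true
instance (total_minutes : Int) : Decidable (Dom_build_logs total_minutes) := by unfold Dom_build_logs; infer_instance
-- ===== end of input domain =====

-- B replaces A's subtract-until-zero loop with a closed form: one divmod gives the number of
-- identical literal full days (replicated) plus a single computed last day (objective: alternative).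

-- f"{n:02d}" ; exact for n ≥ 0, the only values formatted here
def pvFmt2 (n : Int) : String := if n < 10 then "0" ++ PySem.Int.toStr n else PySem.Int.toStr n

-- ===== PORT A =====
-- the while-loop of A, with its `logs` accumulator
def buildLogsGo (left : Int) (logs : List (List (List (String × String)))) :
    List (List (List (String × String))) :=
  if 0 < left then
    let drive := min (11 * 60) left
    let end_h := PySem.Int.floordiv (8 * 60 + drive) 60
    let end_m := PySem.Int.mod (8 * 60 + drive) 60
    let day := [[("status", "on_duty"), ("start", "07:00"), ("end", "08:00")],
                [("status", "driving"), ("start", "08:00"), ("end", pvFmt2 end_h ++ ":" ++ pvFmt2 end_m)]]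
    let day := if drive < left then
        day ++ [[("status", "off_duty"), ("start", pvFmt2 end_h ++ ":" ++ pvFmt2 end_m), ("end", "24:00")]]
      else day
    buildLogsGo (left - drive) (logs ++ [day])
  else logs
termination_by left.toNat
decreasing_by omega

def build_logs (total_minutes : Int) : List (List (List (String × String))) :=
  buildLogsGo total_minutes []

-- ===== PORT B =====
def build_logs_alt (total_minutes : Int) : List (List (List (String × String))) :=
  if total_minutes ≤ 0 then []
  else
    let q := PySem.Int.floordiv total_minutes 660
    let r := PySem.Int.mod total_minutes 660
    let full_days := if r = 0 then q - 1 else q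
    let rem := if r = 0 then 660 else r
    let h := PySem.Int.floordiv (480 + rem) 60
    let m := PySem.Int.mod (480 + rem) 60
    let last_day := [[("status", "on_duty"), ("start", "07:00"), ("end", "08:00")],
                     [("status", "driving"), ("start", "08:00"), ("end", pvFmt2 h ++ ":" ++ pvFmt2 m)]]
    List.replicate full_days.toNat
      [[("status", "on_duty"), ("start", "07:00"), ("end", "08:00")],
       [("status", "driving"), ("start", "08:00"), ("end", "19:00")],
       [("status", "off_duty"), ("start", "19:00"), ("end", "24:00")]]
    ++ [last_day]

-- ===== PRECONDITION & SPEC =====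
def Spec_build_logs (total_minutes : Int) (out : List (List (List (String × String)))) : Prop := out = build_logs_alt total_minutes
instance (total_minutes : Int) (out : List (List (List (String × String)))) : Decidable (Spec_build_logs total_minutes out) := by unfold Spec_build_logs; infer_instance

-- ===== CLAIM =====
def Claim_equal_build_logs : Prop := ∀ (total_minutes : Int), Dom_build_logs total_minutes → Spec_build_logs total_minutes (build_logs total_minutes)

-- ===== LEMMAS AND PROOFS =====

def pvFullDay : List (List (String × String)) :=
  [[("status", "on_duty"), ("start", "07:00"), ("end", "08:00")],
   [("status", "driving"), ("start", "08:00"), ("end", "19:00")],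
   [("status", "off_duty"), ("start", "19:00"), ("end", "24:00")]]

def pvLastDay (rem : Int) : List (List (String × String)) :=
  [[("status", "on_duty"), ("start", "07:00"), ("end", "08:00")],
   [("status", "driving"), ("start", "08:00"),
    ("end", pvFmt2 (PySem.Int.floordiv (480 + rem) 60) ++ ":" ++ pvFmt2 (PySem.Int.mod (480 + rem) 60))]]

-- the day A builds from the remaining minutes `left`
def pvDayA (left : Int) : List (List (String × String)) :=
  let drive := min (11 * 60) left
  let end_h := PySem.Int.floordiv (8 * 60 + drive) 60
  let end_m := PySem.Int.mod (8 * 60 + drive) 60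
  let day := [[("status", "on_duty"), ("start", "07:00"), ("end", "08:00")],
              [("status", "driving"), ("start", "08:00"), ("end", pvFmt2 end_h ++ ":" ++ pvFmt2 end_m)]]
  if drive < left then
    day ++ [[("status", "off_duty"), ("start", pvFmt2 end_h ++ ":" ++ pvFmt2 end_m), ("end", "24:00")]]
  else day

theorem buildLogsGo_neg {left : Int} (h : ¬ 0 < left)
    (logs : List (List (List (String × String)))) : buildLogsGo left logs = logs := by
  rw [buildLogsGo]; simp [h]

theorem buildLogsGo_pos {left : Int} (h : 0 < left)
    (logs : List (List (List (String × String)))) :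
    buildLogsGo left logs = buildLogsGo (left - min (11 * 60) left) (logs ++ [pvDayA left]) := by
  rw [buildLogsGo]; rw [if_pos h]; rfl

theorem buildLogsGo_append : ∀ (n : Nat) (left : Int)
    (logs : List (List (List (String × String)))), left.toNat ≤ n →
    buildLogsGo left logs = logs ++ buildLogsGo left [] := by
  intro n
  induction n with
  | zero =>
    intro left logs h
    have hn : ¬ 0 < left := by omega
    rw [buildLogsGo_neg hn, buildLogsGo_neg hn]; simp
  | succ n ih =>
    intro left logs h
    by_cases hp : 0 < left
    · rw [buildLogsGo_pos hp, buildLogsGo_pos hp,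
        ih (left - min (11 * 60) left) (logs ++ [pvDayA left]) (by omega),
        ih (left - min (11 * 60) left) ([] ++ [pvDayA left]) (by omega)]
      simp
    · rw [buildLogsGo_neg hp, buildLogsGo_neg hp]; simp

theorem dayA_full {left : Int} (h : 660 < left) : pvDayA left = pvFullDay := by
  unfold pvDayA pvFullDay
  rw [min_eq_left (by omega : (11 * 60 : Int) ≤ left)]
  rw [if_pos (by omega : (11 * 60 : Int) < left)]
  rfl

theorem dayA_last {left : Int} (h0 : 0 < left) (h : left ≤ 660) : pvDayA left = pvLastDay left := by
  unfold pvDayA pvLastDay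
  rw [min_eq_right (by omega : left ≤ (11 * 60 : Int))]
  rw [if_neg (by omega : ¬ left < left)]
  norm_num

-- A's loop on 660*fd + rem yields fd full days and one last day
theorem buildLogs_main : ∀ (n : Nat) (fd rem : Int), 0 ≤ fd → 0 < rem → rem ≤ 660 →
    fd.toNat ≤ n →
    buildLogsGo (660 * fd + rem) [] = List.replicate fd.toNat pvFullDay ++ [pvLastDay rem] := by
  intro n
  induction n with
  | zero =>
    intro fd rem h0 hr1 hr2 hn
    have hfd : fd = 0 := by omega
    subst hfd
    rw [show (660 : Int) * 0 + rem = rem by ring]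
    rw [buildLogsGo_pos (by omega)]
    rw [min_eq_right (by omega : rem ≤ (11 * 60 : Int))]
    rw [buildLogsGo_neg (by omega)]
    simp [dayA_last hr1 hr2]
  | succ n ih =>
    intro fd rem h0 hr1 hr2 hn
    by_cases hfd : fd = 0
    · subst hfd
      rw [show (660 : Int) * 0 + rem = rem by ring]
      rw [buildLogsGo_pos (by omega)]
      rw [min_eq_right (by omega : rem ≤ (11 * 60 : Int))]
      rw [buildLogsGo_neg (by omega)]
      simp [dayA_last hr1 hr2]
    · have hpos : (660 : Int) < 660 * fd + rem := by
        have : (660 : Int) * 1 ≤ 660 * fd := by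
          apply mul_le_mul_of_nonneg_left (by omega) (by norm_num)
        omega
      rw [buildLogsGo_pos (by omega)]
      rw [min_eq_left (by omega : (11 * 60 : Int) ≤ 660 * fd + rem)]
      rw [buildLogsGo_append (660 * fd + rem - 11 * 60).toNat _ _ le_rfl]
      have harg : 660 * fd + rem - 11 * 60 = 660 * (fd - 1) + rem := by ring
      rw [harg, ih (fd - 1) rem (by omega) hr1 hr2 (by omega),
        dayA_full hpos]
      have hfd' : fd.toNat = (fd - 1).toNat + 1 := by omega
      rw [hfd', List.replicate_succ]
      simp

-- ===== VERDICT =====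
theorem build_logs_spec : Claim_equal_build_logs := by
  intro t _
  unfold Spec_build_logs build_logs build_logs_alt
  by_cases ht : t ≤ 0
  · rw [if_pos ht, buildLogsGo_neg (by omega)]
  · rw [if_neg ht]
    generalize hqdef : PySem.Int.floordiv t 660 = q at *
    generalize hrdef : PySem.Int.mod t 660 = r
    show buildLogsGo t [] =
      List.replicate (if r = 0 then q - 1 else q).toNat pvFullDay ++
        [pvLastDay (if r = 0 then 660 else r)]
    have heq : q * 660 + r = t := by
      rw [← hqdef, ← hrdef]; exact PySem.Int.floordiv_mul_add_mod t 660
    have hr0 : 0 ≤ r := by rw [← hrdef]; exact PySem.Int.mod_nonneg t (by norm_num)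
    have hr1 : r < 660 := by rw [← hrdef]; exact PySem.Int.mod_lt t (by norm_num)
    by_cases hz : r = 0
    · rw [if_pos hz, if_pos hz]
      have := buildLogs_main (q - 1).toNat (q - 1) 660 (by omega) (by norm_num)
        (by norm_num) le_rfl
      rw [show t = 660 * (q - 1) + 660 by omega, this]
    · rw [if_neg hz, if_neg hz]
      have := buildLogs_main q.toNat q r (by omega) (by omega) (by omega) le_rfl
      rw [show t = 660 * q + r by omega, this]
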